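-- pv_equiv track=rewrite | github.com/DEADWRITE13/my_works | main.py | generate_permutations_with_prefix_suffix
-- ===== SOURCE A (Python) =====
-- from typing import List, Any
--
-- def generate_permutations_with_prefix_suffix(
--         arr: List[Any], prefix: List[Any] = None, suffix: List[Any] = None
-- ) -> List[List[Any]]:
--     if prefix is None:
--         prefix = []
--     if suffix is None:
--         suffix = []
--     prefix_len = len(prefix)
--     suffix_len = len(suffix)
--     if prefix_len + suffix_len > len(arr):
--         return []
--     remaining = [x for x in arr if x not in prefix and x not in suffix]
--     def _generate(current_permutation, remaining_elements):
--         if not remaining_elements: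
--             return [current_permutation]
--         permutations = []
--         for i, element in enumerate(remaining_elements):
--             new_remaining = remaining_elements[:i] + remaining_elements[i + 1:]
--             permutations.extend(_generate(current_permutation + [element], new_remaining))
--         return permutations
--     results = _generate(prefix, remaining)
--     results = [x + suffix for x in results]
--     return [perm for perm in results if perm[:prefix_len] == prefix and perm[-suffix_len:] == suffix]
-- ===== SOURCE B (Python) =====
-- from typing import List, Any
--
-- def generate_permutations_with_prefix_suffix(
--         arr: List[Any], prefix: List[Any] = None, suffix: List[Any] = None
-- ) -> List[List[Any]]:
--     if prefix is None:
--         prefix = []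
--     if suffix is None:
--         suffix = []
--     prefix_len = len(prefix)
--     suffix_len = len(suffix)
--     if prefix_len + suffix_len > len(arr):
--         return []
--     remaining = [x for x in arr if x not in prefix and x not in suffix]
--     n = len(remaining)
--     # enumerate permutations by decoding each index k < n! in the factorial
--     # number system: digit i selects which of the unused elements comes next.
--     # This emits permutations in the same order as lexicographic-by-position.
--     total = 1
--     for i in range(2, n + 1):
--         total *= i
--     results = []
--     for k in range(total):
--         pool = list(remaining)
--         perm = list(prefix)
--         f = total
--         r = k
--         for m in range(n, 0, -1):
--             f //= m
--             idx, r = divmod(r, f)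
--             perm.append(pool.pop(idx))
--         results.append(perm + suffix)
--     return [perm for perm in results if perm[:prefix_len] == prefix and perm[-suffix_len:] == suffix]
-- ===== Notes on version B (the rewrite author's own statement) =====
-- stated objective: alternative
-- what changed: Replaces A's recursive _generate helper (enumerate + slice recursion) by non-recursive factorial-number-system decoding: each index k < n! is decoded by successive divmod into selections popped from a pool, emitting permutations in the same lexicographic-by-position order; the guard, the remaining computation and the final filter line are unchanged.
import Mathlib
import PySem

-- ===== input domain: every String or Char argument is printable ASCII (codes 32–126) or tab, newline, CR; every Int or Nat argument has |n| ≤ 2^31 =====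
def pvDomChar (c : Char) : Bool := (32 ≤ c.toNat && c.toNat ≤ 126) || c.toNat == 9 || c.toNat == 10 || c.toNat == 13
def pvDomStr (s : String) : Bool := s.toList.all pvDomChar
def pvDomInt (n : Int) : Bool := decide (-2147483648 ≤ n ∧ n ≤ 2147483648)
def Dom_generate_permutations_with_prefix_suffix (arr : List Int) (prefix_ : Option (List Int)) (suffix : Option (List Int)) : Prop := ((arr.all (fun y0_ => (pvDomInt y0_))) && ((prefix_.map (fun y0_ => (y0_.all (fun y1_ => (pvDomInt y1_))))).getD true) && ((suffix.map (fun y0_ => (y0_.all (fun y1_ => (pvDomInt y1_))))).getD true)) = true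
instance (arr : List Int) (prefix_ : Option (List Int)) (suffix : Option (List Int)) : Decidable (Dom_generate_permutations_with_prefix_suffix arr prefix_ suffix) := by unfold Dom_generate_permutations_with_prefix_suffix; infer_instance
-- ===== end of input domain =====

-- B replaces A's recursive _generate helper by non-recursive factorial-number-system decoding of
-- each permutation index (alternative decomposition, same order and cost); A's guard, `remaining`
-- computation and final filter line are kept unchanged.

-- ===== PORT A =====
-- A's inner recursive helper `_generate`; `fuel` (= remaining.length at the call site) only
-- makes the recursion structural, it never changes the computed value.
def pvAGen (fuel : Nat) (cur : List Int) (rem : List Int) : List (List Int) :=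
  match fuel with
  | 0 => [cur]
  | fuel' + 1 =>
    if rem = [] then [cur]
    else
      (PySem.List.enumerate rem).foldl
        (fun acc ie =>
          acc ++ pvAGen fuel' (cur ++ [ie.2])
            (PySem.List.slice rem none (some ie.1) ++ PySem.List.slice rem (some (ie.1 + 1)) none))
        []

def generate_permutations_with_prefix_suffix (arr : List Int) (prefix_ : Option (List Int)) (suffix : Option (List Int)) : List (List Int) :=
  let p := match prefix_ with | none => [] | some l => l
  let s := match suffix with | none => [] | some l => l
  let prefix_len : Int := p.length
  let suffix_len : Int := s.length
  if prefix_len + suffix_len > (arr.length : Int) then []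
  else
    let remaining := arr.filter (fun x => !(p.contains x) && !(s.contains x))
    let results := pvAGen remaining.length p remaining
    let results2 := results.map (fun x => x ++ s)
    results2.filter (fun perm =>
      (PySem.List.slice perm none (some prefix_len) == p) &&
      (PySem.List.slice perm (some (-suffix_len)) none == s))

-- ===== PORT B =====
-- one iteration of B's inner `for m in range(n, 0, -1)` loop on the state ((perm, pool), (f, r));
-- the `none` fallbacks of divmod?/pop? are totality guards only: at every call site f' ≥ 1 and
-- idx < len(pool), so that Python code never raises there.
def pvBStep (st : (List Int × List Int) × (Int × Int)) (m : Int) : (List Int × List Int) × (Int × Int) :=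
  let f' := PySem.Int.floordiv st.2.1 m
  match PySem.Int.divmod? st.2.2 f' with
  | none => st
  | some (idx, r') =>
    match PySem.List.pop? st.1.2 idx with
    | none => st
    | some er => ((st.1.1 ++ [er.1], er.2), (f', r'))

def generate_permutations_with_prefix_suffix_alt (arr : List Int) (prefix_ : Option (List Int)) (suffix : Option (List Int)) : List (List Int) :=
  let p := prefix_.getD []
  let s := suffix.getD []
  let prefix_len : Int := p.length
  let suffix_len : Int := s.length
  if prefix_len + suffix_len > (arr.length : Int) then []
  else
    let remaining := arr.filter (fun x => !(p.contains x) && !(s.contains x))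
    let n := remaining.length
    let total := (PySem.List.pyRange 2 ((n : Int) + 1) 1).foldl (fun t i => t * i) 1
    let results := (PySem.List.pyRange 0 total 1).foldl
      (fun acc k =>
        let st := (PySem.List.pyRange (n : Int) 0 (-1)).foldl pvBStep ((p, remaining), (total, k))
        acc ++ [st.1.1 ++ s]) []
    results.filter (fun perm =>
      (PySem.List.slice perm none (some prefix_len) == p) &&
      (PySem.List.slice perm (some (-suffix_len)) none == s))

-- ===== PRECONDITION & SPEC =====
def Spec_generate_permutations_with_prefix_suffix (arr : List Int) (prefix_ : Option (List Int)) (suffix : Option (List Int)) (out : List (List Int)) : Prop := out = generate_permutations_with_prefix_suffix_alt arr prefix_ suffix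
instance (arr : List Int) (prefix_ : Option (List Int)) (suffix : Option (List Int)) (out : List (List Int)) : Decidable (Spec_generate_permutations_with_prefix_suffix arr prefix_ suffix out) := by unfold Spec_generate_permutations_with_prefix_suffix; infer_instance

-- ===== CLAIM (what is proved, stated in full; the proofs are below) =====
def Claim_equal_generate_permutations_with_prefix_suffix : Prop := ∀ (arr : List Int) (prefix_ : Option (List Int)) (suffix : Option (List Int)), Dom_generate_permutations_with_prefix_suffix arr prefix_ suffix → Spec_generate_permutations_with_prefix_suffix arr prefix_ suffix (generate_permutations_with_prefix_suffix arr prefix_ suffix)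

-- ===== LEMMAS AND PROOFS =====

theorem pv_flatMap_congr {a b : Type} {l : List a} {f g : a → List b}
    (h : ∀ x, x ∈ l → f x = g x) : l.flatMap f = l.flatMap g := by
  induction l with
  | nil => rfl
  | cons y l ih =>
    simp only [List.flatMap_cons, h y (by simp), ih (fun x hx => h x (by simp [hx]))]

-- splitting range(0, n*F) into n consecutive blocks of length F
theorem pvRangeBlocks (n F : Nat) :
    PySem.List.pyRange 0 ((n : Int) * (F : Int)) 1
      = (List.range n).flatMap (fun (i : Nat) => (PySem.List.pyRange 0 (F : Int) 1).map (fun j => ((i : Nat) : Int) * (F : Int) + j)) := by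
  induction n with
  | zero => simp [PySem.List.pyRange_one_eq_nil]
  | succ m ih =>
    have hc : ((m + 1 : Nat) : Int) * (F : Int) - (m : Int) * (F : Int) = (F : Int) := by push_cast; ring
    have hsplit : PySem.List.pyRange 0 (((m + 1 : Nat) : Int) * (F : Int)) 1
        = PySem.List.pyRange 0 ((m : Int) * (F : Int)) 1
          ++ PySem.List.pyRange ((m : Int) * (F : Int)) (((m + 1 : Nat) : Int) * (F : Int)) 1 := by
      apply PySem.List.pyRange_one_append
      · positivity
      · nlinarith [Nat.cast_nonneg (α := Int) F]
    have hblock : PySem.List.pyRange ((m : Int) * (F : Int)) (((m + 1 : Nat) : Int) * (F : Int)) 1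
        = (PySem.List.pyRange 0 (F : Int) 1).map (fun j => (m : Int) * (F : Int) + j) := by
      rw [PySem.List.pyRange_one ((m : Int) * (F : Int)), PySem.List.pyRange_one 0 (F : Int), List.map_map]
      rw [hc, sub_zero (F : Int)]
      apply List.map_congr_left
      intro k _
      simp
    rw [hsplit, hblock, List.range_succ, List.flatMap_append, ih]
    simp

-- unfolding A's helper on a nonempty list (extend-in-a-loop = flatMap)
theorem pvAGen_unfold (fuel : Nat) (c r : List Int) (hr : r ≠ []) :
    pvAGen (fuel + 1) c r
      = (PySem.List.enumerate r).flatMap (fun ie =>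
          pvAGen fuel (c ++ [ie.2])
            (PySem.List.slice r none (some ie.1) ++ PySem.List.slice r (some (ie.1 + 1)) none)) := by
  rw [pvAGen, if_neg hr, PySem.List.foldl_append_eq_flatMap, List.nil_append]

-- A's two slices remove exactly the chosen element
theorem pvSlices (r : List Int) (k : Nat) :
    PySem.List.slice r none (some ((k : Int))) ++ PySem.List.slice r (some ((k : Int) + 1)) none
      = r.eraseIdx k := by
  have h1 : ((k : Int) + 1) = ((k + 1 : Nat) : Int) := by push_cast; ring
  rw [PySem.List.slice_to_natCast, h1, PySem.List.slice_from_natCast, List.eraseIdx_eq_take_drop_succ]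

-- the first iteration of B's inner loop extracts digit i and selects pool[i]
theorem pvFirstStep (cur pool : List Int) (m i : Nat) (j : Int) (hlen : pool.length = m + 1)
    (hi : i < m + 1) (hj0 : 0 ≤ j) (hj : j < ((Nat.factorial m : Nat) : Int)) :
    pvBStep ((cur, pool), (((Nat.factorial (m+1) : Nat) : Int), (i : Int) * ((Nat.factorial m : Nat) : Int) + j)) ((m+1 : Nat) : Int)
      = ((cur ++ [pool[i]'(by omega)], pool.eraseIdx i), (((Nat.factorial m : Nat) : Int), j)) := by
  have hFpos : (0:Int) < ((Nat.factorial m : Nat) : Int) := by exact_mod_cast Nat.factorial_pos m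
  have hfd : PySem.Int.floordiv ((Nat.factorial (m+1) : Nat) : Int) ((m+1 : Nat) : Int)
      = ((Nat.factorial m : Nat) : Int) := by
    rw [PySem.Int.floordiv_natCast]
    congr 1
    rw [Nat.factorial_succ, Nat.mul_div_cancel_left _ (Nat.succ_pos m)]
  have hdm : PySem.Int.divmod? ((i : Int) * ((Nat.factorial m : Nat) : Int) + j) ((Nat.factorial m : Nat) : Int) = some ((i:Int), j) := by
    simp only [PySem.Int.divmod?, if_neg hFpos.ne']
    have h1 : PySem.Int.floordiv ((i:Int) * ((Nat.factorial m : Nat) : Int) + j) ((Nat.factorial m : Nat) : Int) = (i:Int) := by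
      rw [PySem.Int.floordiv_eq_iff_of_pos hFpos]; constructor <;> nlinarith
    have h2 : PySem.Int.mod ((i:Int) * ((Nat.factorial m : Nat) : Int) + j) ((Nat.factorial m : Nat) : Int) = j := by
      rw [PySem.Int.mod_eq_emod_of_pos hFpos, add_comm, Int.add_mul_emod_self_right]
      exact Int.emod_eq_of_lt hj0 hj
    simp only [PySem.Int.floordiv] at h1
    simp only [PySem.Int.mod] at h2
    rw [h1, h2]
  have hpop := PySem.List.pop?_natCast pool i (by omega)
  simp only [pvBStep, hfd, hdm, hpop]

-- CORE: decoding every k < n! through B's inner loop yields exactly A's recursive enumeration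
theorem pvDecode_eq (n : Nat) : ∀ (pool cur : List Int), pool.length = n →
    (PySem.List.pyRange 0 ((Nat.factorial n : Nat) : Int) 1).map (fun k =>
        ((PySem.List.pyRange ((n : Nat) : Int) 0 (-1)).foldl pvBStep ((cur, pool), (((Nat.factorial n : Nat) : Int), k))).1.1)
      = pvAGen n cur pool := by
  induction n with
  | zero =>
    intro pool cur hlen
    rw [List.length_eq_zero_iff] at hlen
    subst hlen
    rw [PySem.List.pyRange_neg_one_eq_nil (by norm_num)]
    norm_num [PySem.List.pyRange_one, pvAGen]
  | succ m ih =>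
    intro pool cur hlen
    have hpool : pool ≠ [] := by intro h; subst h; simp at hlen
    -- decompose the countdown range
    have hcd : PySem.List.pyRange ((m + 1 : Nat) : Int) 0 (-1)
        = ((m + 1 : Nat) : Int) :: PySem.List.pyRange ((m : Nat) : Int) 0 (-1) := by
      rw [PySem.List.pyRange_neg_one_cons (by positivity)]
      congr 2
      push_cast
      omega
    -- decompose the index range into blocks
    have hfact : ((Nat.factorial (m + 1) : Nat) : Int) = ((m + 1 : Nat) : Int) * ((Nat.factorial m : Nat) : Int) := by
      rw [Nat.factorial_succ]; push_cast; ring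
    rw [hfact, pvRangeBlocks (m + 1) (Nat.factorial m), List.map_flatMap]
    -- A side
    rw [pvAGen_unfold m cur pool hpool, PySem.List.enumerate_eq_map_pyRange pool 0,
        List.flatMap_map]
    have hlenI : PySem.List.len pool = ((m + 1 : Nat) : Int) := by
      simp [PySem.List.len_eq, hlen]
    rw [hlenI, PySem.List.pyRange_one 0 ((m + 1 : Nat) : Int), List.flatMap_map]
    rw [sub_zero ((m + 1 : Nat) : Int), Int.toNat_natCast]
    apply pv_flatMap_congr
    intro i hiR
    rw [List.mem_range] at hiR
    -- B block i
    rw [List.map_map]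
    have hmap : ∀ j ∈ PySem.List.pyRange 0 ((Nat.factorial m : Nat) : Int) 1,
        (((PySem.List.pyRange ((m + 1 : Nat) : Int) 0 (-1)).foldl pvBStep
            ((cur, pool), (((m + 1 : Nat) : Int) * ((Nat.factorial m : Nat) : Int), (i : Int) * ((Nat.factorial m : Nat) : Int) + j))).1.1)
          = (((PySem.List.pyRange ((m : Nat) : Int) 0 (-1)).foldl pvBStep
            ((cur ++ [pool[i]'(by omega)], pool.eraseIdx i), (((Nat.factorial m : Nat) : Int), j))).1.1) := by
      intro j hjR
      rw [PySem.List.mem_pyRange_one] at hjR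
      rw [hcd, List.foldl_cons, ← hfact, pvFirstStep cur pool m i j hlen hiR hjR.1 hjR.2]
    rw [List.map_congr_left (fun j hj => by rw [Function.comp_apply, hmap j hj])]
    rw [ih (pool.eraseIdx i) (cur ++ [pool[i]'(by omega)]) (by rw [List.length_eraseIdx_of_lt] <;> omega)]
    -- A side element i
    have hget : PySem.List.pyGetD pool (0 + (i : Int)) 0 = pool[i]'(by omega) := by
      rw [zero_add, PySem.List.pyGetD_natCast, List.getD_eq_getElem?_getD, List.getElem?_eq_getElem (by omega)]
      rfl
    rw [hget, zero_add ((i : Nat) : Int), pvSlices]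

-- B's `total` loop computes n!
theorem pvTotal_eq (n : Nat) :
    (PySem.List.pyRange 2 ((n : Int) + 1) 1).foldl (fun t i => t * i) 1
      = ((Nat.factorial n : Nat) : Int) := by
  induction n with
  | zero => rw [PySem.List.pyRange_one_eq_nil (by norm_num)]; rfl
  | succ m ih =>
    by_cases hm : m = 0
    · subst hm
      rw [PySem.List.pyRange_one_eq_nil (by norm_num)]; rfl
    · have h1 : ((m + 1 : Nat) : Int) + 1 = ((m : Int) + 1) + 1 := by push_cast; ring
      rw [h1, PySem.List.pyRange_one_succ_right (by omega), List.foldl_append, ih]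
      simp only [List.foldl_cons, List.foldl_nil, Nat.factorial_succ]
      push_cast; ring

-- equality of the two port bodies
theorem pvA_alt_eq (arr : List Int) (prefix_ suffix : Option (List Int)) :
    generate_permutations_with_prefix_suffix arr prefix_ suffix
      = generate_permutations_with_prefix_suffix_alt arr prefix_ suffix := by
  cases prefix_ <;> cases suffix <;>
  · unfold generate_permutations_with_prefix_suffix generate_permutations_with_prefix_suffix_alt
    simp only [Option.getD_some, Option.getD_none]
    split
    · rfl
    · congr 1
      rw [pvTotal_eq, PySem.List.foldl_append_singleton_eq_map, List.nil_append]
      rw [← pvDecode_eq _ _ _ rfl, List.map_map]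
      rfl

-- ===== VERDICT (by name: the statement is the Claim_ definition above) =====
theorem generate_permutations_with_prefix_suffix_spec : Claim_equal_generate_permutations_with_prefix_suffix := by
  intro arr prefix_ suffix _
  exact pvA_alt_eq arr prefix_ suffix
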